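-- pv_equiv track=rewrite | github.com/TobiasWallner/Fiber | embed/Allocator/AllocatorHeaderSizeEncodingStats.py | next_encodable_spacing_2
-- ===== SOURCE A (Python) =====
-- def next_encodable_spacing_2(user_size):
--     result = 0b10110110110110110110110
--     bit_flip_poses = [22, 20, 19, 17, 16, 14, 13, 11, 10, 8, 7, 5, 4, 2, 1]
--     for i in range(15):
--         # try to clear the largest pos-bit to make it smaller
--         bit_flip_pos = bit_flip_poses[i]
--         temp = result ^ (1 << bit_flip_pos)
--
--         # if temp got smaller but is still larger than user_size --> take it
--         if(temp > user_size):
--             result = temp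
--
--     # result is now the smallest number that is larger than than user_size and still representable in the encoding.
--     return result
-- ===== SOURCE B (Python) =====
-- def next_encodable_spacing_2(user_size):
--     # Enumerate every encodable value (all subset sums of the mask's bit weights),
--     # then pick the smallest one strictly greater than user_size; fall back to the
--     # full mask when none exceeds user_size.
--     mask = 0b10110110110110110110110
--     vals = [0]
--     for pos in [22, 20, 19, 17, 16, 14, 13, 11, 10, 8, 7, 5, 4, 2, 1]:
--         w = 1 << pos
--         vals = vals + [v + w for v in vals]
--     return min((v for v in vals if v > user_size), default=mask)
-- ===== Notes on version B (the rewrite author's own statement) =====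
-- stated objective: alternative
-- what changed: A's greedy top-down bit-clearing pass is replaced by exhaustively enumerating every encodable value (all subset sums of the mask's bit weights, built by list doubling) and returning the smallest one strictly above user_size, with the full mask as fallback.
import Mathlib
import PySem

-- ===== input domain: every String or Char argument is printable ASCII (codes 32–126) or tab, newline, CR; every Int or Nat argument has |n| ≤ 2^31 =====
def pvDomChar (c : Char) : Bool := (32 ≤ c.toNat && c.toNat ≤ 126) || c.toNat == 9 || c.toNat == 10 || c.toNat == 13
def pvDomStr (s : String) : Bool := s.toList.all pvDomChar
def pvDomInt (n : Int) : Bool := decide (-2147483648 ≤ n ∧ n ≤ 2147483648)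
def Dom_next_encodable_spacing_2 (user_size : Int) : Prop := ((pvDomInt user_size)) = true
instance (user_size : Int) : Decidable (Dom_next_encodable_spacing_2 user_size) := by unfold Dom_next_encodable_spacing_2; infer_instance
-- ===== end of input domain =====

-- B replaces A's greedy top-down bit-clearing pass with a brute-force enumeration of every
-- encodable value (the subset sums of the mask's bit weights) followed by picking the
-- smallest one above user_size, falling back to the full mask (objective: alternative).

-- ===== PORT A =====
-- literal port of A's loop: for i in range(15): pos = bit_flip_poses[i]; temp = result ^ (1 << pos);
-- if temp > user_size: result = temp.  The index i is always in range 0..14, so pyGetD's default 0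
-- is never used; 1 << pos ports to (1 : Int) <<< pos.toNat (pos is a nonnegative literal, so exact).
def next_encodable_spacing_2 (user_size : Int) : Int :=
  let bit_flip_poses : List Int := [22, 20, 19, 17, 16, 14, 13, 11, 10, 8, 7, 5, 4, 2, 1]
  (PySem.List.pyRange 0 15 1).foldl
    (fun result i =>
      let bit_flip_pos := PySem.List.pyGetD bit_flip_poses i 0
      let temp := PySem.Int.bxor result ((1 : Int) <<< bit_flip_pos.toNat)
      if user_size < temp then temp else result)
    5991862


-- ===== PORT B =====
-- literal port of Source B: build vals by doubling (vals = vals + [v + w for v in vals]) over the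
-- 15 bit positions, then min of the values > user_size with default mask (PySem.List.min?).
def next_encodable_spacing_2_alt (user_size : Int) : Int :=
  let vals : List Int :=
    ([22, 20, 19, 17, 16, 14, 13, 11, 10, 8, 7, 5, 4, 2, 1] : List Int).foldl
      (fun vals pos =>
        let w : Int := (1 : Int) <<< pos.toNat
        vals ++ vals.map (fun v => v + w))
      [0]
  (PySem.List.min? (vals.filter (fun v => decide (user_size < v))) (fun v => v)).getD 5991862


-- ===== PRECONDITION & SPEC =====
def Spec_next_encodable_spacing_2 (user_size : Int) (out : Int) : Prop := out = next_encodable_spacing_2_alt user_size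
instance (user_size : Int) (out : Int) : Decidable (Spec_next_encodable_spacing_2 user_size out) := by unfold Spec_next_encodable_spacing_2; infer_instance

-- ===== CLAIM (what is proved, stated in full; the proofs are below) =====
def Claim_equal_next_encodable_spacing_2 : Prop := ∀ (user_size : Int), Dom_next_encodable_spacing_2 user_size → Spec_next_encodable_spacing_2 user_size (next_encodable_spacing_2 user_size)

-- ===== LEMMAS AND PROOFS =====

lemma pv_nat_xor_clear (p a t : Nat) (ht : t < 2 ^ p) :
    (a * 2 ^ (p + 1) + 2 ^ p + t) ^^^ 2 ^ p = a * 2 ^ (p + 1) + t := by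
  have hdiv1 : (a * 2 ^ (p + 1) + 2 ^ p + t) / 2 ^ p = 2 * a + 1 := by
    rw [pow_succ, show a * (2 ^ p * 2) + 2 ^ p + t = 2 ^ p * (2 * a + 1) + t by ring,
        Nat.mul_add_div (by positivity), Nat.div_eq_of_lt ht]
  have hdiv2 : (a * 2 ^ (p + 1) + t) / 2 ^ p = 2 * a := by
    rw [pow_succ, show a * (2 ^ p * 2) + t = 2 ^ p * (2 * a) + t by ring,
        Nat.mul_add_div (by positivity), Nat.div_eq_of_lt ht]
    omega
  apply Nat.eq_of_testBit_eq
  intro i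
  rw [Nat.testBit_xor, Nat.testBit_two_pow]
  rcases lt_trichotomy i p with hip | rfl | hpi
  · have hne : ¬ (p = i) := by omega
    simp only [hne, decide_false, Bool.xor_false]
    rw [Nat.testBit_eq_decide_div_mod_eq, Nat.testBit_eq_decide_div_mod_eq]
    have hsplit : (2:Nat) ^ p = 2 ^ (p - i) * 2 ^ i := by rw [← pow_add]; congr 1; omega
    have h1 : (a * 2 ^ (p + 1) + 2 ^ p + t) / 2 ^ i
        = (a * 2 ^ (p + 1) + t) / 2 ^ i + 2 ^ (p - i) := by
      rw [show a * 2 ^ (p + 1) + 2 ^ p + t = (a * 2 ^ (p+1) + t) + 2 ^ (p-i) * 2 ^ i by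
            rw [← hsplit]; ring,
          Nat.add_mul_div_right _ _ (by positivity)]
    rw [h1]
    rw [decide_eq_decide]
    have h2 : (2:Nat) ^ (p - i) = 2 * 2 ^ (p - i - 1) := by
      rw [← pow_succ']; congr 1; omega
    omega
  · simp only [decide_true, Bool.xor_true]
    rw [Nat.testBit_eq_decide_div_mod_eq, Nat.testBit_eq_decide_div_mod_eq, hdiv1, hdiv2]
    have e1 : (2 * a + 1) % 2 = 1 := by omega
    have e2 : (2 * a) % 2 = 0 := by omega
    simp [e1, e2]
  · have hne : ¬ (p = i) := by omega
    simp only [hne, decide_false, Bool.xor_false]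
    have hi : i = (i - (p+1)) + (p + 1) := by omega
    rw [hi, Nat.testBit_add, Nat.testBit_add]
    have e1 : (a * 2 ^ (p + 1) + 2 ^ p + t) / 2 ^ (p+1) = a := by
      rw [show a * 2 ^ (p + 1) + 2 ^ p + t = (2 ^ p + t) + a * 2 ^ (p+1) by ring,
          Nat.add_mul_div_right _ _ (by positivity), Nat.div_eq_of_lt (by rw [pow_succ]; omega)]
      omega
    have e2 : (a * 2 ^ (p + 1) + t) / 2 ^ (p+1) = a := by
      rw [show a * 2 ^ (p + 1) + t = t + a * 2 ^ (p+1) by ring,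
          Nat.add_mul_div_right _ _ (by positivity),
          Nat.div_eq_of_lt (lt_trans ht (by rw [pow_succ]; omega))]
      omega
    rw [e1, e2]

lemma pv_bxor_clear (p : Nat) (h t : Int) (hd : ((2 : Int) ^ (p + 1)) ∣ h) (hh : 0 ≤ h)
    (ht : 0 ≤ t) (htl : t < 2 ^ p) :
    PySem.Int.bxor (h + 2 ^ p + t) ((1 : Int) <<< p) = h + t := by
  obtain ⟨a, rfl⟩ := hd
  have ha : 0 ≤ a := nonneg_of_mul_nonneg_right hh (by positivity)
  lift a to ℕ using ha with A
  lift t to ℕ using ht with T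
  have hT : T < 2 ^ p := by exact_mod_cast htl
  have e1 : (2:Int) ^ (p+1) * (A:Int) + 2 ^ p + (T:Int) = ((A * 2 ^ (p+1) + 2 ^ p + T : ℕ) : Int) := by
    push_cast; ring
  have e2 : ((1:Int) <<< p) = (((2:ℕ) ^ p : ℕ) : Int) := by
    rw [Int.shiftLeft_eq]; push_cast; ring
  rw [e1, e2, PySem.Int.bxor_natCast, pv_nat_xor_clear _ _ _ hT]
  push_cast; ring

def pvGreedy (u : Int) (r : Int) : List Nat → Int
  | [] => r
  | p :: ps =>
    let t := PySem.Int.bxor r ((1 : Int) <<< p)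
    if u < t then pvGreedy u t ps else pvGreedy u r ps

def pvExpand (cs : List Int) : List Nat → List Int
  | [] => cs
  | p :: ps => pvExpand (cs ++ cs.map (fun v => v + (2 : Int) ^ p)) ps

def pvWsum (ps : List Nat) : Int := (ps.map (fun p => (2 : Int) ^ p)).sum

def pvOk : Nat → List Nat → Prop
  | _, [] => True
  | q, p :: ps => p + 1 ≤ q ∧ pvWsum ps < 2 ^ p ∧ pvOk p ps

lemma pvWsum_nonneg (ps : List Nat) : 0 ≤ pvWsum ps := by
  induction ps with
  | nil => simp [pvWsum]
  | cons p ps ih => simp only [pvWsum, List.map_cons, List.sum_cons] at ih ⊢; positivity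

lemma pvWsum_cons (p : Nat) (ps : List Nat) : pvWsum (p :: ps) = 2 ^ p + pvWsum ps := by
  simp [pvWsum]

lemma pv_main (ps : List Nat) : ∀ (q : Nat) (cs : List Int) (h u : Int),
    pvOk q ps →
    (∀ c ∈ cs, (2 : Int) ^ q ∣ c ∧ 0 ≤ c) →
    h ∈ cs →
    ((u < h + pvWsum ps ∧ ∀ c ∈ cs, u < c + pvWsum ps → h ≤ c) →
      PySem.List.min? ((pvExpand cs ps).filter (fun c => decide (u < c))) (fun v => v)
        = some (pvGreedy u (h + pvWsum ps) ps))
    ∧ (((∀ c ∈ cs, ¬ u < c + pvWsum ps) ∧ ∀ c ∈ cs, c ≤ h) →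
      (pvExpand cs ps).filter (fun c => decide (u < c)) = []
        ∧ pvGreedy u (h + pvWsum ps) ps = h + pvWsum ps) := by
  induction ps with
  | nil =>
    intro q cs h u _ hcs hmem
    constructor
    · rintro ⟨hu, hmin⟩
      simp only [pvWsum, List.map_nil, List.sum_nil, add_zero] at hu hmin ⊢
      simp only [pvExpand, pvGreedy]
      rcases hF : PySem.List.min? (cs.filter (fun c => decide (u < c))) (fun v => v) with _ | m
      · rw [PySem.List.min?_eq_none_iff] at hF
        exfalso
        have : h ∈ cs.filter (fun c => decide (u < c)) :=
          List.mem_filter.mpr ⟨hmem, by simpa using hu⟩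
        simp [hF] at this
      · have hmF := PySem.List.min?_mem hF
        have hmcs := List.mem_filter.mp hmF
        have h1 : h ≤ m := hmin m hmcs.1 (by simpa using hmcs.2)
        have h2 : m ≤ h := PySem.List.min?_isMin hF h
          (List.mem_filter.mpr ⟨hmem, by simpa using hu⟩)
        exact congrArg some (le_antisymm h2 h1)
    · rintro ⟨hall, _⟩
      simp only [pvWsum, List.map_nil, List.sum_nil, add_zero] at hall ⊢
      refine ⟨List.filter_eq_nil_iff.mpr ?_, rfl⟩
      intro c hc
      simpa using hall c hc
  | cons p ps ih =>
    intro q cs h u hok hcs hmem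
    obtain ⟨hgap, htail, hok'⟩ := hok
    set w : Int := (2 : Int) ^ p with hw
    have hwpos : 0 < w := by positivity
    -- the expanded candidate pool after this step
    set cs' : List Int := cs ++ cs.map (fun v => v + w) with hcs'def
    have hcs' : ∀ c ∈ cs', (2 : Int) ^ p ∣ c ∧ 0 ≤ c := by
      intro c hc
      rcases List.mem_append.mp hc with hc | hc
      · obtain ⟨hd, hn⟩ := hcs c hc
        exact ⟨dvd_trans (pow_dvd_pow 2 (by omega)) hd, hn⟩
      · obtain ⟨c0, hc0, rfl⟩ := List.mem_map.mp hc
        obtain ⟨hd, hn⟩ := hcs c0 hc0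
        exact ⟨dvd_add (dvd_trans (pow_dvd_pow 2 (by omega)) hd) dvd_rfl, by positivity⟩
    have hdvd2 : ∀ c ∈ cs, (2 : Int) ^ (p + 1) ∣ c := fun c hc =>
      dvd_trans (pow_dvd_pow 2 (by omega)) (hcs c hc).1
    -- the xor in A's step clears the bit p, i.e. subtracts w
    have hxor : ∀ g, g ∈ cs → PySem.Int.bxor (g + pvWsum (p :: ps)) ((1 : Int) <<< p)
        = g + pvWsum ps := by
      intro g hg
      rw [pvWsum_cons, show g + (2 ^ p + pvWsum ps) = g + 2 ^ p + pvWsum ps by ring]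
      exact pv_bxor_clear p g (pvWsum ps) (hdvd2 g hg) (hcs g hg).2 (pvWsum_nonneg ps) htail
    have hexp : pvExpand cs (p :: ps) = pvExpand cs' ps := rfl
    constructor
    · rintro ⟨hu, hmin⟩
      rw [hexp]
      by_cases hb : u < h + pvWsum ps
      · -- clear the bit: recurse with the same h
        have ih1 := (ih p cs' h u hok' hcs' (List.mem_append.mpr (.inl hmem))).1
          ⟨hb, by
            intro c hc hlt
            rcases List.mem_append.mp hc with hc | hc
            · exact hmin c hc (by rw [pvWsum_cons]; omega)
            · obtain ⟨c0, hc0, rfl⟩ := List.mem_map.mp hc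
              have := hmin c0 hc0 (by rw [pvWsum_cons]; omega)
              omega⟩
        rw [ih1]
        simp only [pvGreedy, hxor h hmem, if_pos hb]
      · -- keep the bit: recurse with h + w
        have hmem' : h + w ∈ cs' :=
          List.mem_append.mpr (.inr (List.mem_map.mpr ⟨h, hmem, rfl⟩))
        have ih1 := (ih p cs' (h + w) u hok' hcs' hmem').1
          ⟨by rw [pvWsum_cons] at hu; omega, by
            intro c hc hlt
            rcases List.mem_append.mp hc with hc | hc
            · -- c ∈ cs with u < c + wsum ps: c exceeds h, and both are multiples of 2^(p+1)
              have hgt : h < c := by omega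
              have hd : (2 : Int) ^ (p + 1) ∣ c - h :=
                dvd_sub (hdvd2 c hc) (hdvd2 h hmem)
              have : (2 : Int) ^ (p + 1) ≤ c - h := Int.le_of_dvd (by omega) hd
              have h2w : (2 : Int) ^ (p + 1) = 2 * w := by rw [hw, pow_succ]; ring
              omega
            · obtain ⟨c0, hc0, rfl⟩ := List.mem_map.mp hc
              have := hmin c0 hc0 (by rw [pvWsum_cons]; omega)
              omega⟩
        rw [show h + pvWsum (p :: ps) = h + w + pvWsum ps by rw [pvWsum_cons]; ring] at *
        rw [ih1]
        simp only [pvGreedy]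
        rw [show h + w + pvWsum ps = h + pvWsum (p :: ps) by rw [pvWsum_cons]; ring,
            hxor h hmem, if_neg hb,
            show h + pvWsum (p :: ps) = h + w + pvWsum ps by rw [pvWsum_cons]; ring]
    · rintro ⟨hall, hub⟩
      rw [hexp]
      have hmem' : h + w ∈ cs' :=
        List.mem_append.mpr (.inr (List.mem_map.mpr ⟨h, hmem, rfl⟩))
      have ih2 := (ih p cs' (h + w) u hok' hcs' hmem').2
        ⟨by
          intro c hc
          rcases List.mem_append.mp hc with hc | hc
          · have := hall c hc; rw [pvWsum_cons] at this
            have := pvWsum_nonneg ps; omega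
          · obtain ⟨c0, hc0, rfl⟩ := List.mem_map.mp hc
            have := hall c0 hc0; rw [pvWsum_cons] at this; omega,
         by
          intro c hc
          rcases List.mem_append.mp hc with hc | hc
          · have := hub c hc; omega
          · obtain ⟨c0, hc0, rfl⟩ := List.mem_map.mp hc
            have := hub c0 hc0; omega⟩
      have hneg : ¬ u < h + pvWsum ps := by
        have := hall h hmem; rw [pvWsum_cons] at this; omega
      refine ⟨ih2.1, ?_⟩
      simp only [pvGreedy, hxor h hmem, if_neg hneg]
      rw [show h + pvWsum (p :: ps) = h + w + pvWsum ps by rw [pvWsum_cons]; ring]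
      rw [ih2.2]

def pvPoses : List Nat := [22, 20, 19, 17, 16, 14, 13, 11, 10, 8, 7, 5, 4, 2, 1]

lemma pvGreedy_eq_foldl (u : Int) : ∀ (ps : List Nat) (r : Int),
    ps.foldl (fun (r : Int) (p : Nat) =>
      let t := PySem.Int.bxor r ((1 : Int) <<< p); if u < t then t else r) r
    = pvGreedy u r ps := by
  intro ps
  induction ps with
  | nil => intro r; rfl
  | cons p ps ih =>
    intro r
    simp only [List.foldl_cons, pvGreedy, ih]
    split <;> rfl

lemma foldl_map_toNat {β : Type} (f : β → Nat → β) : ∀ (xs : List Int) (r : β),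
    xs.foldl (fun r i => f r i.toNat) r = (xs.map Int.toNat).foldl f r := by
  intro xs
  induction xs with
  | nil => intro r; rfl
  | cons x xs ih => intro r; simp only [List.foldl_cons, List.map_cons, ih]

lemma portA_eq (u : Int) : next_encodable_spacing_2 u = pvGreedy u 5991862 pvPoses := by
  simp only [next_encodable_spacing_2]
  rw [show (15 : Int) = PySem.List.len ([22, 20, 19, 17, 16, 14, 13, 11, 10, 8, 7, 5, 4, 2, 1] : List Int) from by simp [PySem.List.len]]
  rw [PySem.List.foldl_pyRange_pyGetD ([22, 20, 19, 17, 16, 14, 13, 11, 10, 8, 7, 5, 4, 2, 1] : List Int) (0 : Int)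
      (fun (acc : Int) (v : Int) =>
        if u < PySem.Int.bxor acc ((1 : Int) <<< v.toNat) then PySem.Int.bxor acc ((1 : Int) <<< v.toNat) else acc)
      5991862 (le_refl 0)]
  rw [Int.toNat_zero, List.drop_zero]
  rw [foldl_map_toNat (fun (r : Int) (p : Nat) =>
      if u < PySem.Int.bxor r ((1 : Int) <<< p) then PySem.Int.bxor r ((1 : Int) <<< p) else r)]
  exact pvGreedy_eq_foldl u _ _

lemma pvExpand_toNat : ∀ (xs : List Int) (cs : List Int),
    xs.foldl (fun vals pos => vals ++ vals.map (fun v => v + (2 : Int) ^ pos.toNat)) cs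
      = pvExpand cs (xs.map Int.toNat) := by
  intro xs
  induction xs with
  | nil => intro cs; rfl
  | cons x xs ih => intro cs; simp only [List.foldl_cons, List.map_cons, pvExpand, ih]

lemma portB_eq (u : Int) : next_encodable_spacing_2_alt u
    = (PySem.List.min? ((pvExpand [0] pvPoses).filter (fun c => decide (u < c)))
        (fun v => v)).getD 5991862 := by
  simp only [next_encodable_spacing_2_alt]
  rw [show (fun (vals : List Int) (pos : Int) =>
        vals ++ vals.map (fun v => v + (1 : Int) <<< ((pos.toNat : Nat) : Int)))
      = (fun (vals : List Int) (pos : Int) =>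
        vals ++ vals.map (fun v => v + (2 : Int) ^ pos.toNat)) from by
    funext vals pos
    rw [Int.shiftLeft_natCast_right, Int.shiftLeft_eq, one_mul]]
  rw [pvExpand_toNat]
  rfl

lemma pvOk_top : pvOk 23 pvPoses := by
  simp only [pvPoses, pvOk]
  norm_num [pvWsum]

lemma pv_final (u : Int) : next_encodable_spacing_2 u = next_encodable_spacing_2_alt u := by
  rw [portA_eq, portB_eq]
  have hcs : ∀ c ∈ ([0] : List Int), (2 : Int) ^ 23 ∣ c ∧ 0 ≤ c := by simp
  have hws : (0 : Int) + pvWsum pvPoses = 5991862 := by decide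
  by_cases hu : u < 5991862
  · have h1 := (pv_main pvPoses 23 [0] 0 u pvOk_top hcs (by simp)).1
      ⟨by omega, by intro c hc _; simp at hc; omega⟩
    rw [hws] at h1
    rw [h1, Option.getD_some]
  · have h2 := (pv_main pvPoses 23 [0] 0 u pvOk_top hcs (by simp)).2
      ⟨by intro c hc; simp at hc; subst hc; omega, by intro c hc; simp at hc; omega⟩
    rw [hws] at h2
    rw [h2.1, h2.2]
    rfl

-- ===== VERDICT (by name: the statement is the Claim_ definition above) =====
theorem next_encodable_spacing_2_spec : Claim_equal_next_encodable_spacing_2 := by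
  intro user_size _
  unfold Spec_next_encodable_spacing_2
  exact pv_final user_size
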